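-- pv_equiv track=rewrite | github.com/alb-i/16scale-on-15ma | pitches.py | getPitchNames
-- ===== SOURCE A (Python) =====
-- def normalizePitch(pitch,modulo=24):
--     return pitch % modulo # unlike C, this has the same sign as the denumerator modulo
--
-- def getPitchNameCandidates(pitch):
--     x = normalizePitch(pitch)
--     candidate_list = [
--         ["J", "Kb", "Y#"], #C
--         ["K", "J#"],
--         ["Lb", "K#"],
--         ["L", "Mb"],
--         ["M", "L#"],
--         ["Nb", "M#"],
--         ["N"],
--         ["Ob", "N#"],
--         ["O", "Pb"],
--         ["P", "O#"],
--         ["Qb", "P#"],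
--         ["Q"],
--         ["Rb", "Q#"], #C
--         ["R"],
--         ["Sb", "R#"],
--         ["S", "Tb"],
--         ["T", "S#"],
--         ["Ub", "T#"],
--         ["U"],
--         ["Vb", "U#"],
--         ["V", "Xb"],
--         ["X", "V#"],
--         ["Yb", "X#"],
--         ["Y", "Jb"]
--     ]
--     return candidate_list[x]
--
-- def scorePartialChoice(choice):
--     nbr_sharps = len([1 for x in choice if x.endswith("#")])
--     nbr_flats = len([1 for x in choice if x.endswith("b")])
--     unique_pitches = len(frozenset((x[0] for x in choice)))
--     return 49*nbr_sharps + 50*nbr_flats + 5000*(len(choice)-unique_pitches)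
--
-- def getPitchNames(pitches, candidates=getPitchNameCandidates):
--     """
--       takes a list of pitches and returns a list of pitch class names
--     """
--     p0 = sorted(frozenset(map(normalizePitch, pitches)))
--     choices = [candidates(x) for x in p0]
--     # get trivial upper bound
--     defaultChoice = tuple((x[0] for x in choices))
--     defaultScore = scorePartialChoice(defaultChoice)
--     # run depth first search with bound
--     def dfs(partialChoice, upperBound, boundChoice):
--         if (len(partialChoice) == len(choices)):
--             return scorePartialChoice(partialChoice),partialChoice
--         for candidate in choices[len(partialChoice)]:
--             nextChoice = partialChoice + (candidate,)
--             nextScore = scorePartialChoice(nextChoice)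
--             if nextScore < upperBound:
--                 upperBound, boundChoice = dfs(nextChoice,upperBound,boundChoice)
--         return upperBound, boundChoice
--
--     _,finalChoice = dfs(tuple(),defaultScore,defaultChoice)
--     return [finalChoice[p0.index(normalizePitch(x))] for x in pitches]
-- ===== SOURCE B (Python) =====
-- # B: replaces the bounded depth-first search by breadth-wise exhaustive enumeration of the
-- # whole candidate product, scoring incrementally, then taking the first minimum with min().
-- def normalizePitch(pitch, modulo=24):
--     return pitch % modulo
--
-- def getPitchNameCandidates(pitch):
--     x = normalizePitch(pitch)
--     candidate_list = [
--         ["J", "Kb", "Y#"],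
--         ["K", "J#"],
--         ["Lb", "K#"],
--         ["L", "Mb"],
--         ["M", "L#"],
--         ["Nb", "M#"],
--         ["N"],
--         ["Ob", "N#"],
--         ["O", "Pb"],
--         ["P", "O#"],
--         ["Qb", "P#"],
--         ["Q"],
--         ["Rb", "Q#"],
--         ["R"],
--         ["Sb", "R#"],
--         ["S", "Tb"],
--         ["T", "S#"],
--         ["Ub", "T#"],
--         ["U"],
--         ["Vb", "U#"],
--         ["V", "Xb"],
--         ["X", "V#"],
--         ["Yb", "X#"],
--         ["Y", "Jb"]
--     ]
--     return candidate_list[x]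
--
-- def getPitchNames(pitches, candidates=getPitchNameCandidates):
--     """
--       takes a list of pitches and returns a list of pitch class names
--     """
--     p0 = sorted(frozenset(map(normalizePitch, pitches)))
--     choices = [candidates(x) for x in p0]
--     # breadth-wise product of all candidate lists; each entry is
--     # (reversed cons-chain of chosen names, running score, first letters seen so far)
--     level = [(None, 0, "")]
--     for cands in choices:
--         level = [((x, c),
--                   s + 49 * (x[-1] == '#') + 50 * (x[-1] == 'b')
--                     + 5000 * (x[0] in seen),
--                   seen if x[0] in seen else seen + x[0])
--                  for (c, s, seen) in level for x in cands]
--     best = min(level, key=lambda t: t[1])[0]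
--     names = []
--     while best is not None:
--         names.append(best[0])
--         best = best[1]
--     names.reverse()
--     return [names[p0.index(normalizePitch(x))] for x in pitches]
-- ===== Notes on version B (the rewrite author's own statement) =====
-- stated objective: alternative
-- what changed: The recursive branch-and-bound DFS (rescoring each partial tuple from scratch) is replaced by a breadth-wise exhaustive enumeration of the full candidate product with incrementally maintained scores, followed by a single min() that picks the first combination in product order reaching the global minimum.
import Mathlib
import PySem

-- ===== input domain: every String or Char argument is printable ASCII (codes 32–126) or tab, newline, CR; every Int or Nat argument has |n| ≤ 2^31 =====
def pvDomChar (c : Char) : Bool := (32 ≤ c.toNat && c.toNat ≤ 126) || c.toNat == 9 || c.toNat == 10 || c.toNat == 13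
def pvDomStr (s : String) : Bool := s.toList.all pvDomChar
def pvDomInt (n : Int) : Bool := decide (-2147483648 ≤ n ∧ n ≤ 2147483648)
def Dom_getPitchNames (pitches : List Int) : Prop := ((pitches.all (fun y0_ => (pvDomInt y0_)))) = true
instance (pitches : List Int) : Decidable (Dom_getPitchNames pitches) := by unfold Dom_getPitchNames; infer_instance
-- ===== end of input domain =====

-- B replaces A's bounded depth-first search by breadth-wise exhaustive enumeration of the
-- candidate product with incremental scoring and a single first-minimum pass (objective:
-- alternative; not faster).

-- ===== PORT A =====
-- shared module-level helpers (identical code in Source A and Source B)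
def pvNorm (pitch : Int) : Int := PySem.Int.mod pitch 24

def pvTable : List (List String) :=
  [["J", "Kb", "Y#"], ["K", "J#"], ["Lb", "K#"], ["L", "Mb"], ["M", "L#"],
   ["Nb", "M#"], ["N"], ["Ob", "N#"], ["O", "Pb"], ["P", "O#"], ["Qb", "P#"],
   ["Q"], ["Rb", "Q#"], ["R"], ["Sb", "R#"], ["S", "Tb"], ["T", "S#"],
   ["Ub", "T#"], ["U"], ["Vb", "U#"], ["V", "Xb"], ["X", "V#"], ["Yb", "X#"],
   ["Y", "Jb"]]

-- candidate_list[x]; x = pitch % 24 is always in range, .getD [] only totalises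
def pvCands (pitch : Int) : List String :=
  (PySem.List.pyGet? pvTable (pvNorm pitch)).getD []

-- x[0] as a Char; .getD '?' only totalises (names are never empty).  In B, 'x[0] in seen'
-- is single-character membership, so seen is kept as the List Char of first letters.
def pvFc (x : String) : Char := (PySem.Str.pyGet? x 0).getD '?'

-- scorePartialChoice; x[0] on the always-nonempty names, .getD '?' only totalises
def pvScore (choice : List String) : Int :=
  let nbrSharps : Int := ((choice.filter (fun x => PySem.Str.endswith x "#")).map (fun _ => (1 : Int))).length
  let nbrFlats : Int := ((choice.filter (fun x => PySem.Str.endswith x "b")).map (fun _ => (1 : Int))).length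
  let uniquePitches : Int := (PySem.Set.ofList (choice.map pvFc) : List Char).length
  49 * nbrSharps + 50 * nbrFlats + 5000 * ((choice.length : Int) - uniquePitches)

-- the inner dfs; 'choices[len(partialChoice)]' becomes structural recursion on the
-- still-unprocessed suffix of choices (partialChoice always has the consumed prefix's length)
mutual
def pvDfs : List (List String) → List String → Int → List String → Int × List String
  | [], partialC, _, _ => (pvScore partialC, partialC)
  | cands :: rest, partialC, ub, bc => pvDfsLoop cands rest partialC ub bc
  termination_by l _ _ _ => (l.length, 1, 0)
def pvDfsLoop : List String → List (List String) → List String → Int → List String → Int × List String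
  | [], _, _, ub, bc => (ub, bc)
  | cand :: cs, rest, partialC, ub, bc =>
    let next := partialC ++ [cand]
    let ns := pvScore next
    let s := if ns < ub then pvDfs rest next ub bc else (ub, bc)
    pvDfsLoop cs rest partialC s.1 s.2
  termination_by cs rest _ _ _ => (rest.length + 1, 0, cs.length)
end

def getPitchNames (pitches : List Int) : List String :=
  let p0 := PySem.List.sorted (PySem.Set.ofList (pitches.map pvNorm)) (fun x => x) false
  let choices := p0.map pvCands
  let defaultChoice := choices.map (fun x => (PySem.List.pyGet? x 0).getD "")
  let defaultScore := pvScore defaultChoice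
  let r := pvDfs choices [] defaultScore defaultChoice
  -- p0.index(...) always succeeds; .getD 0 only totalises
  pitches.map (fun x =>
    (PySem.List.pyGet? r.2 (((PySem.List.index? p0 (pvNorm x)).getD 0 : Nat) : Int)).getD "")

-- ===== PORT B =====
def getPitchNames_alt (pitches : List Int) : List String :=
  let p0 := PySem.List.sorted (PySem.Set.ofList (pitches.map pvNorm)) (fun x => x) false
  let choices := p0.map pvCands
  -- entries: (reversed cons-chain of chosen names, running score, first letters seen)
  let level := choices.foldl
    (fun lvl cands => lvl.flatMap (fun e => cands.map (fun x =>
      (x :: e.1,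
       e.2.1 + 49 * (if PySem.Str.pyGet? x (-1) = some '#' then (1 : Int) else 0)
             + 50 * (if PySem.Str.pyGet? x (-1) = some 'b' then (1 : Int) else 0)
             + 5000 * (if e.2.2.contains (pvFc x) then (1 : Int) else 0),
       if e.2.2.contains (pvFc x) then e.2.2 else e.2.2 ++ [pvFc x]))))
    [(([] : List String), (0 : Int), ([] : List Char))]
  -- min over the never-empty level; .getD only totalises.  The while loop reading the
  -- cons-chain front to back yields the chain itself, then names.reverse().
  let best := (PySem.List.min? level (fun t => t.2.1)).getD ([], 0, [])
  let names := best.1.reverse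
  pitches.map (fun x =>
    (PySem.List.pyGet? names (((PySem.List.index? p0 (pvNorm x)).getD 0 : Nat) : Int)).getD "")

-- ===== PRECONDITION & SPEC =====
def Spec_getPitchNames (pitches : List Int) (out : List String) : Prop := out = getPitchNames_alt pitches
instance (pitches : List Int) (out : List String) : Decidable (Spec_getPitchNames pitches out) := by unfold Spec_getPitchNames; infer_instance

-- ===== CLAIM (what is proved, stated in full; the proofs are below) =====
def Claim_equal_getPitchNames : Prop := ∀ (pitches : List Int), Dom_getPitchNames pitches → Spec_getPitchNames pitches (getPitchNames pitches)

-- ===== LEMMAS AND PROOFS =====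

-- the candidate product, in A's dfs / B's comprehension order
def pvCombos : List (List String) → List (List String)
  | [] => [[]]
  | cs :: rest => cs.flatMap (fun x => (pvCombos rest).map (fun t => x :: t))

-- B's level entry for a chosen combination
def pvEnc (c : List String) : List String × Int × List Char :=
  (c.reverse, pvScore c, (PySem.Set.ofList (c.map pvFc) : List Char))

-- B's last-character tests agree with A's endswith on the names that actually occur
def pvGood (x : String) : Bool :=
  (PySem.Str.endswith x "#" == decide (PySem.Str.pyGet? x (-1) = some '#')) &&
  (PySem.Str.endswith x "b" == decide (PySem.Str.pyGet? x (-1) = some 'b'))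

-- one bound-update step of A's dfs, as a fold step over whole remaining combinations
def pvStepA (partialC : List String) (st : Int × List String) (c : List String) : Int × List String :=
  if pvScore (partialC ++ c) < st.1 then (pvScore (partialC ++ c), partialC ++ c) else st

lemma pvScore_append (c : List String) (x : String) :
    pvScore (c ++ [x]) = pvScore c
      + 49 * (if PySem.Str.endswith x "#" then (1 : Int) else 0)
      + 50 * (if PySem.Str.endswith x "b" then (1 : Int) else 0)
      + 5000 * (if (PySem.Set.ofList (c.map pvFc) : List Char).contains (pvFc x) then (1 : Int) else 0) := by
  have hset : (PySem.Set.ofList ((c ++ [x]).map pvFc) : List Char)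
      = PySem.Set.add (PySem.Set.ofList (c.map pvFc)) (pvFc x) := by
    simp [PySem.Set.ofList_eq_foldl, List.foldl_append]
  have hadd : PySem.Set.add (PySem.Set.ofList (c.map pvFc)) (pvFc x)
      = if (PySem.Set.ofList (c.map pvFc) : List Char).contains (pvFc x)
        then (PySem.Set.ofList (c.map pvFc) : List Char)
        else (PySem.Set.ofList (c.map pvFc) : List Char) ++ [pvFc x] := rfl
  simp only [pvScore]
  rw [hset, hadd]
  simp only [List.filter_append, List.map_append, List.length_append, List.length_map,
    List.filter_cons, List.filter_nil]
  split_ifs <;>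
    simp only [List.length_append, List.length_cons, List.length_nil] <;>
    push_cast <;> omega

lemma pvScore_le_append : ∀ (ext c : List String), pvScore c ≤ pvScore (c ++ ext) := by
  intro ext
  induction ext with
  | nil => intro c; simp
  | cons x ext ih =>
    intro c
    have h1 : pvScore c ≤ pvScore (c ++ [x]) := by
      rw [pvScore_append]
      have : (0:Int) ≤ 49 * (if PySem.Str.endswith x "#" then (1 : Int) else 0)
          + 50 * (if PySem.Str.endswith x "b" then (1 : Int) else 0)
          + 5000 * (if (PySem.Set.ofList (c.map pvFc) : List Char).contains (pvFc x) then (1 : Int) else 0) := by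
        split_ifs <;> norm_num
      omega
    have h2 := ih (c ++ [x])
    rw [List.append_cons]
    omega

lemma pvStepA_const {l : List (List String)} {pc : List String} {ub : Int} {bc : List String}
    (h : ∀ c ∈ l, ¬ pvScore (pc ++ c) < ub) : l.foldl (pvStepA pc) (ub, bc) = (ub, bc) := by
  induction l with
  | nil => rfl
  | cons c l ih =>
    have hc := h c (by simp)
    simp only [List.foldl_cons, pvStepA, if_neg hc]
    exact ih (fun c hcl => h c (by simp [hcl]))

lemma pvDfs_fold : ∀ rest : List (List String),
    (∀ partialC ub bc, pvScore partialC < ub →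
      pvDfs rest partialC ub bc = (pvCombos rest).foldl (pvStepA partialC) (ub, bc)) ∧
    (∀ cands partialC ub bc,
      pvDfsLoop cands rest partialC ub bc =
        (cands.flatMap (fun x => (pvCombos rest).map (fun t => x :: t))).foldl (pvStepA partialC) (ub, bc)) := by
  intro rest
  induction rest with
  | nil =>
    refine ⟨?_, ?_⟩
    · intro pc ub bc h
      simp only [pvDfs, pvCombos, List.foldl_cons, List.foldl_nil, pvStepA, List.append_nil,
        if_pos h]
    · intro cands
      induction cands with
      | nil => intro pc ub bc; simp [pvDfsLoop]
      | cons cand cs ihc =>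
        intro pc ub bc
        simp only [pvDfsLoop, pvDfs]
        rw [List.flatMap_cons, List.foldl_append]
        simp only [pvCombos, List.map_cons, List.map_nil, List.foldl_cons, List.foldl_nil]
        by_cases h : pvScore (pc ++ [cand]) < ub
        · simp only [if_pos h, pvStepA]
          rw [ihc]
          simp [pvCombos]
        · simp only [if_neg h, pvStepA]
          rw [ihc]
          simp [pvCombos]
  | cons cs0 rest ih =>
    have l1 : ∀ partialC ub bc, pvScore partialC < ub →
        pvDfs (cs0 :: rest) partialC ub bc
          = (pvCombos (cs0 :: rest)).foldl (pvStepA partialC) (ub, bc) := by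
      intro pc ub bc _
      simp only [pvDfs]
      rw [ih.2 cs0 pc ub bc]
      rfl
    refine ⟨l1, ?_⟩
    intro cands
    induction cands with
    | nil => intro pc ub bc; simp [pvDfsLoop]
    | cons cand cs ihc =>
      intro pc ub bc
      simp only [pvDfsLoop]
      rw [List.flatMap_cons, List.foldl_append]
      by_cases h : pvScore (pc ++ [cand]) < ub
      · simp only [if_pos h]
        rw [l1 (pc ++ [cand]) ub bc h, List.foldl_map]
        have hcong : ∀ (st : Int × List String) t, pvStepA pc st (cand :: t)
            = pvStepA (pc ++ [cand]) st t := by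
          intro st t
          unfold pvStepA
          rw [show pc ++ cand :: t = (pc ++ [cand]) ++ t from by simp]
        simp only [hcong]
        rw [ihc]
      · simp only [if_neg h]
        have hconst : (List.map (fun t => cand :: t) (pvCombos (cs0 :: rest))).foldl
            (pvStepA pc) (ub, bc) = (ub, bc) := by
          apply pvStepA_const
          intro c hc
          simp only [List.mem_map] at hc
          obtain ⟨t, _, rfl⟩ := hc
          have := pvScore_le_append t (pc ++ [cand])
          rw [List.append_cons]
          omega
        rw [hconst, ihc]

lemma pvCombos_head {choices : List (List String)} (h : ∀ c ∈ choices, c ≠ []) :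
    ∃ tl, pvCombos choices = (choices.map (fun x => (PySem.List.pyGet? x 0).getD "")) :: tl := by
  induction choices with
  | nil => exact ⟨[], rfl⟩
  | cons c rest ih =>
    obtain ⟨tl, htl⟩ := ih (fun c hc => h c (by simp [hc]))
    cases c with
    | nil => exact absurd rfl (h [] (by simp))
    | cons y ys =>
      refine ⟨tl.map (fun t => y :: t) ++ ys.flatMap (fun x => (pvCombos rest).map (fun t => x :: t)), ?_⟩
      simp [pvCombos, htl, PySem.List.pyGet?, PySem.List.pyIdx?]

lemma pvMin?_cons {α κ : Type} [LinearOrder κ] (key : α → κ) (c0 : α) (l : List α) :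
    PySem.List.min? (c0 :: l) key = some (l.foldl (fun m x => if key x < key m then x else m) c0) := by
  have gen : ∀ (l : List α) (m : α),
      List.foldl (fun (acc : Option α) x =>
        match acc with
        | none => some x
        | some m => if key x < key m then some x else some m) (some m) l
      = some (l.foldl (fun m x => if key x < key m then x else m) m) := by
    intro l
    induction l with
    | nil => intro m; rfl
    | cons x l ih =>
      intro m
      simp only [List.foldl_cons]
      by_cases h : key x < key m
      · simp only [if_pos h]; exact ih x
      · simp only [if_neg h]; exact ih m
  simp only [PySem.List.min?, List.foldl_cons]
  exact gen l c0

lemma pvMin?_map {α β κ : Type} [LinearOrder κ] (f : α → β) (key : β → κ) (l : List α) :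
    PySem.List.min? (l.map f) key = (PySem.List.min? l (fun a => key (f a))).map f := by
  have gen : ∀ (l : List α) (acc : Option α),
      List.foldl (fun (acc : Option β) x =>
        match acc with
        | none => some x
        | some m => if key x < key m then some x else some m) (acc.map f) (l.map f)
      = (List.foldl (fun (acc : Option α) a =>
          match acc with
          | none => some a
          | some m => if key (f a) < key (f m) then some a else some m) acc l).map f := by
    intro l
    induction l with
    | nil => intro acc; simp
    | cons a l ih =>
      intro acc
      simp only [List.map_cons, List.foldl_cons]
      cases acc with
      | none => exact ih (some a)
      | some m =>
        simp only [Option.map_some]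
        by_cases h : key (f a) < key (f m)
        · rw [if_pos h, if_pos h]; exact ih (some a)
        · rw [if_neg h, if_neg h]; exact ih (some m)
  simpa only [PySem.List.min?, Option.map_none] using gen l none

lemma pvFoldl_pair (l : List (List String)) (m : List String) :
    l.foldl (pvStepA []) (pvScore m, m) =
      (fun r => (pvScore r, r)) (l.foldl (fun m x => if pvScore x < pvScore m then x else m) m) := by
  induction l generalizing m with
  | nil => rfl
  | cons x l ih =>
    simp only [List.foldl_cons, pvStepA, List.nil_append]
    by_cases h : pvScore x < pvScore m
    · rw [if_pos h, if_pos h]; exact ih x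
    · rw [if_neg h, if_neg h]; exact ih m

lemma pvFlatMapCongr {α β : Type} {l : List α} {f g : α → List β}
    (h : ∀ x ∈ l, f x = g x) : l.flatMap f = l.flatMap g := by
  induction l with
  | nil => rfl
  | cons a l ih =>
    simp only [List.flatMap_cons, h a (by simp)]
    rw [ih (fun x hx => h x (by simp [hx]))]

lemma pvStep1_enc (x : String) (hx : pvGood x = true) (c : List String) :
    ((x :: (pvEnc c).1,
      (pvEnc c).2.1 + 49 * (if PySem.Str.pyGet? x (-1) = some '#' then (1 : Int) else 0)
                    + 50 * (if PySem.Str.pyGet? x (-1) = some 'b' then (1 : Int) else 0)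
                    + 5000 * (if (pvEnc c).2.2.contains (pvFc x) then (1 : Int) else 0),
      if (pvEnc c).2.2.contains (pvFc x) then (pvEnc c).2.2 else (pvEnc c).2.2 ++ [pvFc x])) =
    pvEnc (c ++ [x]) := by
  simp only [pvGood, Bool.and_eq_true, beq_iff_eq] at hx
  obtain ⟨h1, h2⟩ := hx
  have hset : (PySem.Set.ofList ((c ++ [x]).map pvFc) : List Char)
      = PySem.Set.add (PySem.Set.ofList (c.map pvFc)) (pvFc x) := by
    simp [PySem.Set.ofList_eq_foldl, List.foldl_append]
  simp only [pvEnc, Prod.mk.injEq]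
  refine ⟨by simp, ?_, ?_⟩
  · rw [pvScore_append, h1, h2]
    simp only [decide_eq_true_eq, PySem.Set.contains_eq_listContains]
    split_ifs <;> rfl
  · rw [hset]
    rfl

lemma pvLevel_eq : ∀ (choices : List (List String)),
    (∀ cs ∈ choices, ∀ x ∈ cs, pvGood x = true) → ∀ (init : List (List String)),
    choices.foldl
      (fun lvl cands => lvl.flatMap (fun e => cands.map (fun x =>
        (x :: e.1,
         e.2.1 + 49 * (if PySem.Str.pyGet? x (-1) = some '#' then (1 : Int) else 0)
               + 50 * (if PySem.Str.pyGet? x (-1) = some 'b' then (1 : Int) else 0)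
               + 5000 * (if e.2.2.contains (pvFc x) then (1 : Int) else 0),
         if e.2.2.contains (pvFc x) then e.2.2 else e.2.2 ++ [pvFc x]))))
      (init.map pvEnc) =
    (init.flatMap (fun c => (pvCombos choices).map (fun t => c ++ t))).map pvEnc := by
  intro choices
  induction choices with
  | nil =>
    intro _ init
    simp [pvCombos]
  | cons cs rest ih =>
    intro h init
    simp only [List.foldl_cons]
    have hstep : (init.map pvEnc).flatMap (fun e => cs.map (fun x =>
        (x :: e.1,
         e.2.1 + 49 * (if PySem.Str.pyGet? x (-1) = some '#' then (1 : Int) else 0)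
               + 50 * (if PySem.Str.pyGet? x (-1) = some 'b' then (1 : Int) else 0)
               + 5000 * (if e.2.2.contains (pvFc x) then (1 : Int) else 0),
         if e.2.2.contains (pvFc x) then e.2.2 else e.2.2 ++ [pvFc x])))
        = (init.flatMap (fun c => cs.map (fun x => c ++ [x]))).map pvEnc := by
      rw [List.flatMap_map, List.map_flatMap]
      apply pvFlatMapCongr
      intro c _
      rw [List.map_map]
      apply List.map_congr_left
      intro x hx
      exact pvStep1_enc x (h cs (by simp) x hx) c
    rw [hstep, ih (fun cs' h' x hx => h cs' (by simp [h']) x hx)]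
    congr 1
    rw [List.flatMap_assoc]
    apply pvFlatMapCongr
    intro c _
    show (cs.map (fun x => c ++ [x])).flatMap (fun c' => (pvCombos rest).map (fun t => c' ++ t))
        = (pvCombos (cs :: rest)).map (fun t => c ++ t)
    simp only [pvCombos, List.flatMap_map, List.map_flatMap]
    apply pvFlatMapCongr
    intro x _
    simp [List.map_map, Function.comp_def]

lemma pvCands_good (v : Int) (h1 : 0 ≤ v) (h2 : v < 24) :
    pvCands v ≠ [] ∧ ∀ x ∈ pvCands v, pvGood x = true := by
  interval_cases v <;> exact ⟨by decide, by decide⟩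

-- ===== VERDICT (by name: the statement is the Claim_ definition above) =====
theorem getPitchNames_spec : Claim_equal_getPitchNames := by
  intro pitches _
  unfold Spec_getPitchNames
  by_cases hnil : pitches = []
  · subst hnil
    simp [getPitchNames, getPitchNames_alt]
  · simp only [getPitchNames, getPitchNames_alt]
    set p0 := PySem.List.sorted (PySem.Set.ofList (List.map pvNorm pitches)) (fun x => x) false
      with hp0
    set choices := List.map pvCands p0 with hchoices
    set d0 := List.map (fun x => (PySem.List.pyGet? x 0).getD "") choices with hd0
    have hmem : ∀ v ∈ p0, 0 ≤ v ∧ v < 24 := by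
      intro v hv
      rw [hp0, PySem.List.mem_sorted, PySem.Set.mem_ofList] at hv
      obtain ⟨p, _, rfl⟩ := List.mem_map.mp hv
      exact ⟨PySem.Int.mod_nonneg p (by norm_num), PySem.Int.mod_lt p (by norm_num)⟩
    have hnonnil : ∀ cs ∈ choices, cs ≠ [] := by
      intro cs hcs
      rw [hchoices] at hcs
      obtain ⟨v, hv, rfl⟩ := List.mem_map.mp hcs
      exact (pvCands_good v (hmem v hv).1 (hmem v hv).2).1
    have hgood : ∀ cs ∈ choices, ∀ x ∈ cs, pvGood x = true := by
      intro cs hcs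
      rw [hchoices] at hcs
      obtain ⟨v, hv, rfl⟩ := List.mem_map.mp hcs
      exact (pvCands_good v (hmem v hv).1 (hmem v hv).2).2
    obtain ⟨tl, htl⟩ := pvCombos_head hnonnil
    rw [← hd0] at htl
    have hp0ne : p0 ≠ [] := by
      obtain ⟨p, ps, rfl⟩ := List.exists_cons_of_ne_nil hnil
      have hm : pvNorm p ∈ p0 := by
        rw [hp0, PySem.List.mem_sorted, PySem.Set.mem_ofList]
        simp
      intro h0
      rw [h0] at hm
      simp at hm
    cases hc : choices with
    | nil =>
      exact absurd (List.map_eq_nil_iff.mp (hchoices ▸ hc)) hp0ne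
    | cons cs0 restC =>
      have hApair : pvDfs choices [] (pvScore d0) d0
          = (pvScore (tl.foldl (fun m x => if pvScore x < pvScore m then x else m) d0),
             tl.foldl (fun m x => if pvScore x < pvScore m then x else m) d0) := by
        rw [hc]
        simp only [pvDfs]
        rw [(pvDfs_fold restC).2 cs0 [] (pvScore d0) d0]
        have hcb : (cs0.flatMap (fun x => (pvCombos restC).map (fun t => x :: t)))
            = pvCombos (cs0 :: restC) := rfl
        rw [hcb, ← hc, htl, List.foldl_cons]
        have hfirst : pvStepA [] (pvScore d0, d0) d0 = (pvScore d0, d0) := by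
          simp [pvStepA]
        rw [hfirst, pvFoldl_pair]
      have h0 : ([(([] : List String), (0 : Int), ([] : List Char))])
          = ([[]] : List (List String)).map pvEnc := by
        norm_num [pvEnc, pvScore]
      rw [show cs0 :: restC = choices from hc.symm]
      rw [hApair, h0, pvLevel_eq choices hgood [[]]]
      have hinit : (([[]] : List (List String)).flatMap
          (fun c => (pvCombos choices).map (fun t => c ++ t))) = pvCombos choices := by
        simp
      rw [hinit, htl, pvMin?_map pvEnc (fun t => t.2.1) (d0 :: tl)]
      have hkey : (fun c => (pvEnc c).2.1) = pvScore := rfl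
      rw [hkey, pvMin?_cons pvScore d0 tl]
      simp only [Option.map_some, Option.getD_some, pvEnc, List.reverse_reverse]
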